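-- pv_equiv track=rewrite | github.com/aditya-pandey-ai/Leetcode | 2691-count-vowel-strings-in-ranges/2691-count-vowel-strings-in-ranges.py | vowelStrings
-- ===== SOURCE A (Python) =====
-- from typing import List
--
-- def vowelStrings(words: List[str], queries: List[List[int]]) -> List[int]:
--     vowel_set = set("aeiou")
--
--     # Compute prefix counts for words that start and end with vowels
--     prev_cnt = [0] * (len(words) + 1)
--     for i, w in enumerate(words):
--         if w[0] in vowel_set and w[-1] in vowel_set:
--             prev_cnt[i + 1] = prev_cnt[i] + 1
--         else:
--             prev_cnt[i + 1] = prev_cnt[i]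
--
--     # Process each query
--     res = [0] * len(queries)
--     for i, q in enumerate(queries):
--         l, r = q
--         res[i] = prev_cnt[r + 1] - prev_cnt[l]
--
--     return res
-- ===== SOURCE B (Python) =====
-- from bisect import bisect_left, bisect_right
-- from typing import List
--
-- def vowelStrings(words: List[str], queries: List[List[int]]) -> List[int]:
--     vowels = set("aeiou")
--     positions = [i for i, w in enumerate(words) if w[0] in vowels and w[-1] in vowels]
--     return [bisect_right(positions, r) - bisect_left(positions, l) for l, r in queries]
-- ===== Notes on version B (the rewrite author's own statement) =====
-- stated objective: alternative
-- what changed: Replaces A's prefix-count array (answered by O(1) subtraction, with Python's negative indices wrapping into that array) with a sorted list of the qualifying word indices answered per query by bisect binary search.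
-- intended difference: On queries whose l or r is negative (still inside the index range A accepts) and where a vowel-bordered word lies in exactly one of the two wrapped-off prefixes, A's reads prev_cnt[l]/prev_cnt[r+1] wrap to the end of the prefix array and A returns a count over that wrapped range (e.g. 0 for query [-1,0] on ['a']); B returns the count of vowel-bordered words with index in [max(l,0), r] (1 there), the intended answer for the query [l, r]. — e.g. on vowelStrings(["a"], [[-1, 0]]): A returns [0], B returns [1]
import Mathlib
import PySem

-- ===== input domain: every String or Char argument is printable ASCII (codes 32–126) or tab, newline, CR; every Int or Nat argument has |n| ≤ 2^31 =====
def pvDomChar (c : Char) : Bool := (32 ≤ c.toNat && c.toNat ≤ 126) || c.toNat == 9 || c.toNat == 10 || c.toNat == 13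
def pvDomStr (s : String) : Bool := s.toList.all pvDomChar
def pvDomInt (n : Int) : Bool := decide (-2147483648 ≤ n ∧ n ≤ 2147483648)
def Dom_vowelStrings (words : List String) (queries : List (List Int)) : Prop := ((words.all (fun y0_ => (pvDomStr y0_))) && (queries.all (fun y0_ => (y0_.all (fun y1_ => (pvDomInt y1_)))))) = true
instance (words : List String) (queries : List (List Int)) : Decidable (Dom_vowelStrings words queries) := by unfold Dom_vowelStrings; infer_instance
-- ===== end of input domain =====

-- B replaces A's prefix-count array (answering queries by subtraction, with Python's negative
-- indices wrapping into that array) by a sorted list of the qualifying word indices queried with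
-- bisect; equal cost, different data structure ("alternative"); return values only, no mutation.

-- ===== PORT A =====
-- shared helper: does w start and end with a vowel ('w[0] in vowel_set and w[-1] in vowel_set';
-- on the empty string Python raises IndexError — excluded by Pre_ — and the port yields false)
def pvVowels : PySem.Set Char := PySem.Set.ofList "aeiou".toList

def pvIsVB (w : String) : Bool :=
  ((PySem.Str.pyGet? w 0).elim false (fun c => PySem.Set.contains pvVowels c)) &&
  ((PySem.Str.pyGet? w (-1)).elim false (fun c => PySem.Set.contains pvVowels c))

-- one iteration of A's first loop: 'prev_cnt[i+1] = prev_cnt[i] (+ 1)'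
def pvStepA (pc : List Int) (p : Int × String) : List Int :=
  if pvIsVB p.2 then PySem.List.pySetD pc (p.1 + 1) (PySem.List.pyGetD pc p.1 0 + 1)
  else PySem.List.pySetD pc (p.1 + 1) (PySem.List.pyGetD pc p.1 0)

-- 'l, r = q' is ported as q[0], q[1] (exact under Pre_, which demands len(q) = 2); the reads
-- prev_cnt[r+1], prev_cnt[l] use pyGet? (none = IndexError, excluded by Pre_) defaulted with .getD
def vowelStrings (words : List String) (queries : List (List Int)) : List Int :=
  let prevCnt := (PySem.List.enumerate words).foldl pvStepA (List.replicate (words.length + 1) 0)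
  (PySem.List.enumerate queries).foldl
    (fun res p =>
      PySem.List.pySetD res p.1
        ((PySem.List.pyGet? prevCnt (PySem.List.pyGetD p.2 1 0 + 1)).getD 0 -
         (PySem.List.pyGet? prevCnt (PySem.List.pyGetD p.2 0 0)).getD 0))
    (List.replicate queries.length 0)

-- ===== PORT B =====
def vowelStrings_alt (words : List String) (queries : List (List Int)) : List Int :=
  let positions : List Int :=
    (PySem.List.enumerate words).filterMap (fun p => if pvIsVB p.2 then some p.1 else none)
  queries.map (fun q =>
    ((PySem.List.bisectRight positions (PySem.List.pyGetD q 1 0) : Int) -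
     (PySem.List.bisectLeft positions (PySem.List.pyGetD q 0 0) : Int)))

-- ===== PRECONDITION & SPEC =====
-- a query is accepted by A iff it has exactly two entries and both prefix-array accesses
-- prev_cnt[l], prev_cnt[r+1] are in Python's (wraparound) range for a list of length len(words)+1
def pvQOk (N : Int) (q : List Int) : Bool :=
  match q with
  | [l, r] => decide (-(N + 1) ≤ l ∧ l ≤ N ∧ -(N + 2) ≤ r ∧ r ≤ N - 1)
  | _ => false

-- Pre_ excludes exactly the inputs on which A raises: an empty word (IndexError on w[0]),
-- a query whose length is not 2 (unpacking raises), or a query index outside wraparound range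
def Pre_vowelStrings (words : List String) (queries : List (List Int)) : Prop :=
  words.all (fun w => !w.toList.isEmpty) = true ∧
  queries.all (pvQOk (words.length : Int)) = true

instance (words : List String) (queries : List (List Int)) : Decidable (Pre_vowelStrings words queries) := by
  unfold Pre_vowelStrings; infer_instance

def pvWitness_vowelStrings : List String × List (List Int) := (["ae", "b"], [[0, 1], [1, 0]])

-- index i lies in the wrapped-off prefix that Python's negative index t selects from the
-- length-(len(words)+1) prefix array (empty when t is nonnegative)
def pvInW (ws : List String) (i : Nat) (t : Int) : Prop :=
  t < 0 ∧ (i : Int) < ws.length + 1 + t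

-- On queries whose l or r is negative (still inside the index range A accepts) and where a
-- vowel-bordered word lies in exactly one of the two wrapped-off prefixes, A's reads
-- prev_cnt[l] / prev_cnt[r+1] wrap to the end of the prefix array and A returns a count over
-- that wrapped range; B returns the count of vowel-bordered words with index in [max(l,0), r],
-- the intended answer for the query [l, r].
def D_vowelStrings (words : List String) (queries : List (List Int)) : Prop :=
  ∃ q ∈ queries, ∃ i ∈ List.range words.length,
    pvIsVB (words.getD i "") = true ∧
    ¬(pvInW words i (q.getD 0 0) ↔ pvInW words i (q.getD 1 0 + 1))

instance (words : List String) (queries : List (List Int)) : Decidable (D_vowelStrings words queries) := by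
  unfold D_vowelStrings pvInW; infer_instance

def Spec_vowelStrings (words : List String) (queries : List (List Int)) (out : List Int) : Prop :=
  ¬ D_vowelStrings words queries → out = vowelStrings_alt words queries

instance (words : List String) (queries : List (List Int)) (out : List Int) : Decidable (Spec_vowelStrings words queries out) := by
  unfold Spec_vowelStrings; infer_instance

def pvDiffWitness_vowelStrings : List String × List (List Int) := (["a"], [[-1, 0]])
def pvDiffWitnessOut_vowelStrings : (List Int) × (List Int) := ([0], [1])

-- ===== CLAIM (what is proved, stated in full; the proofs are below) =====
def Claim_unchanged_vowelStrings : Prop := ∀ (words : List String) (queries : List (List Int)), Dom_vowelStrings words queries → Pre_vowelStrings words queries → Spec_vowelStrings words queries (vowelStrings words queries)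

def Claim_changed_vowelStrings : Prop := Dom_vowelStrings (pvDiffWitness_vowelStrings.1) (pvDiffWitness_vowelStrings.2) ∧ Pre_vowelStrings (pvDiffWitness_vowelStrings.1) (pvDiffWitness_vowelStrings.2) ∧ D_vowelStrings (pvDiffWitness_vowelStrings.1) (pvDiffWitness_vowelStrings.2) ∧ vowelStrings (pvDiffWitness_vowelStrings.1) (pvDiffWitness_vowelStrings.2) = pvDiffWitnessOut_vowelStrings.1 ∧ vowelStrings_alt (pvDiffWitness_vowelStrings.1) (pvDiffWitness_vowelStrings.2) = pvDiffWitnessOut_vowelStrings.2 ∧ pvDiffWitnessOut_vowelStrings.1 ≠ pvDiffWitnessOut_vowelStrings.2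

def Claim_exact_vowelStrings : Prop := ∀ (words : List String) (queries : List (List Int)), Dom_vowelStrings words queries → Pre_vowelStrings words queries → D_vowelStrings words queries → vowelStrings words queries ≠ vowelStrings_alt words queries

-- ===== LEMMAS AND PROOFS =====

-- proof-side: the wrapped prefix bound as a Nat, and the per-query difference condition
def pvBnd (n : Nat) (t : Int) : Nat := if 0 ≤ t then 0 else ((n : Int) + 1 + t).toNat

def pvQBad (words : List String) (q : List Int) : Bool :=
  (List.range words.length).any (fun i =>
    decide (min (pvBnd words.length (q.getD 0 0)) (pvBnd words.length (q.getD 1 0 + 1)) ≤ i ∧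
            i < max (pvBnd words.length (q.getD 0 0)) (pvBnd words.length (q.getD 1 0 + 1))) &&
    pvIsVB (words.getD i ""))

theorem pvInW_iff (ws : List String) (i : Nat) (t : Int) :
    pvInW ws i t ↔ i < pvBnd ws.length t := by
  unfold pvInW pvBnd; split <;> omega

-- D_ says exactly: some query is pvQBad
theorem pvD_iff (ws : List String) (qs : List (List Int)) :
    D_vowelStrings ws qs ↔ (qs.any (pvQBad ws)) = true := by
  unfold D_vowelStrings
  rw [List.any_eq_true]
  refine exists_congr fun q => and_congr_right fun _ => ?_
  unfold pvQBad
  rw [List.any_eq_true]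
  refine exists_congr fun i => and_congr_right fun _ => ?_
  rw [Bool.and_eq_true, decide_eq_true_eq, pvInW_iff, pvInW_iff]
  constructor
  · rintro ⟨hv, hx⟩; exact ⟨by omega, hv⟩
  · rintro ⟨hx, hv⟩; exact ⟨hv, by omega⟩

-- number of vowel-bordered words among the first m
def pvCntT (words : List String) (m : Nat) : Nat := (words.take m).countP pvIsVB

-- the wraparound extra: the count of vowel-bordered words below the wrapped bound
def pvG (ws : List String) (t : Int) : Nat := pvCntT ws (pvBnd ws.length t)

-- the prefix-array slot Python's wraparound indexing actually reads for index t
def pvAIdx (n : Nat) (t : Int) : Nat := (if 0 ≤ t then t else (n : Int) + 1 + t).toNat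

theorem pvBnd_le (n : Nat) (t : Int) : pvBnd n t ≤ n := by
  unfold pvBnd; split <;> omega

-- the wrapped prefix count = the intended (clamped) prefix count + the wraparound extra pvG
theorem pvCnt_wrap (words : List String) (t : Int)
    (h1 : -((words.length : Int) + 1) ≤ t) :
    (pvCntT words (pvAIdx words.length t) : Int)
      = pvCntT words t.toNat + pvG words t := by
  by_cases ht : 0 ≤ t
  · simp [pvAIdx, pvG, pvBnd, ht, pvCntT]
  · have h0 : t.toNat = 0 := by omega
    simp [pvAIdx, pvG, pvBnd, ht, h0, pvCntT]

-- two prefix counts differ exactly when a vowel-bordered word lies between the bounds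
theorem pvCnt_ne_iff (ws : List String) (a b : Nat) (hab : a ≤ b) (hb : b ≤ ws.length) :
    (pvCntT ws a ≠ pvCntT ws b) ↔
      ∃ i, a ≤ i ∧ i < b ∧ pvIsVB (ws.getD i "") = true := by
  have hb' : b = a + (b - a) := by omega
  unfold pvCntT
  rw [hb', List.take_add, List.countP_append]
  constructor
  · intro h
    have hm : ((ws.drop a).take (b - a)).countP pvIsVB ≠ 0 := by omega
    rw [Ne, List.countP_eq_zero] at hm
    push_neg at hm
    obtain ⟨x, hx, hpx⟩ := hm
    obtain ⟨j, hj, rfl⟩ := List.mem_iff_getElem.1 hx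
    have hjb : j < b - a ∧ j < ws.length - a := by
      simp only [List.length_take, List.length_drop, lt_min_iff] at hj
      exact hj
    refine ⟨a + j, by omega, by omega, ?_⟩
    have hg : ((ws.drop a).take (b - a))[j] = ws[a + j]'(by omega) := by
      rw [List.getElem_take, List.getElem_drop]
    rw [hg] at hpx
    rw [List.getD_eq_getElem?_getD, List.getElem?_eq_getElem (by omega)]
    simpa using hpx
  · rintro ⟨i, hai, hib, hp⟩
    have hcount : ((ws.drop a).take (b - a)).countP pvIsVB ≠ 0 := by
      rw [Ne, List.countP_eq_zero]
      push_neg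
      refine ⟨ws[i]'(by omega), ?_, ?_⟩
      · apply List.mem_iff_getElem.2
        refine ⟨i - a, by simp only [List.length_take, List.length_drop, lt_min_iff]; omega, ?_⟩
        rw [List.getElem_take, List.getElem_drop]
        congr 1
        omega
      · rw [List.getD_eq_getElem?_getD, List.getElem?_eq_getElem (by omega)] at hp
        simpa using hp
    omega

-- pvQBad holds for a query exactly when the two wraparound extras differ
theorem pvQBad_iff (ws : List String) (l r : Int) :
    pvQBad ws [l, r] = true ↔ pvG ws (r + 1) ≠ pvG ws l := by
  have hbl := pvBnd_le ws.length l
  have hbr := pvBnd_le ws.length (r + 1)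
  have hget0 : ([l, r] : List Int).getD 0 0 = l := rfl
  have hget1 : ([l, r] : List Int).getD 1 0 = r := rfl
  set a := pvBnd ws.length l with ha
  set b := pvBnd ws.length (r + 1) with hbdef
  have hany : pvQBad ws [l, r] = true ↔
      ∃ i, i < ws.length ∧ (min a b ≤ i ∧ i < max a b) ∧ pvIsVB (ws.getD i "") = true := by
    unfold pvQBad
    rw [List.any_eq_true]
    constructor
    · rintro ⟨i, hi, hpi⟩
      rw [List.mem_range] at hi
      rw [Bool.and_eq_true, decide_eq_true_eq] at hpi
      exact ⟨i, hi, by simpa [hget0, hget1] using hpi⟩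
    · rintro ⟨i, hi, hmm, hv⟩
      refine ⟨i, List.mem_range.2 hi, ?_⟩
      rw [Bool.and_eq_true, decide_eq_true_eq]
      simpa [hget0, hget1] using And.intro hmm hv
  rw [hany]
  have hGr : pvG ws (r + 1) = pvCntT ws b := rfl
  have hGl : pvG ws l = pvCntT ws a := rfl
  rw [hGr, hGl]
  by_cases hab : a ≤ b
  · rw [show pvCntT ws b ≠ pvCntT ws a ↔ pvCntT ws a ≠ pvCntT ws b from ne_comm,
      pvCnt_ne_iff ws a b hab hbr]
    constructor
    · rintro ⟨i, _, hmm, hv⟩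
      exact ⟨i, by omega, by omega, hv⟩
    · rintro ⟨i, h1, h2, hv⟩
      exact ⟨i, by omega, ⟨by omega, by omega⟩, hv⟩
  · rw [pvCnt_ne_iff ws b a (by omega) hbl]
    constructor
    · rintro ⟨i, _, hmm, hv⟩
      exact ⟨i, by omega, by omega, hv⟩
    · rintro ⟨i, h1, h2, hv⟩
      exact ⟨i, by omega, ⟨by omega, by omega⟩, hv⟩

-- the sorted list of qualifying indices, built structurally (B's positions list)
def pvPosFrom (k : Int) : List String → List Int
  | [] => []
  | w :: ws => if pvIsVB w then k :: pvPosFrom (k + 1) ws else pvPosFrom (k + 1) ws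

-- running prefix counts (A's prev_cnt without its leading 0), built structurally
def pvSumsFrom (c : Int) : List String → List Int
  | [] => []
  | w :: ws => (if pvIsVB w then c + 1 else c) :: pvSumsFrom (if pvIsVB w then c + 1 else c) ws

theorem pvPosFrom_eq (ws : List String) : ∀ k : Int,
    (PySem.List.enumerate ws k).filterMap (fun p => if pvIsVB p.2 then some p.1 else none)
      = pvPosFrom k ws := by
  induction ws with
  | nil => intro k; simp [PySem.List.enumerate_nil, pvPosFrom]
  | cons w ws ih =>
    intro k
    by_cases h : pvIsVB w <;>
      simp [PySem.List.enumerate_cons, pvPosFrom, h, List.filterMap_cons, ih]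

theorem pvPosFrom_mem (ws : List String) : ∀ (k y : Int), y ∈ pvPosFrom k ws → k ≤ y := by
  induction ws with
  | nil => intro k y h; simp [pvPosFrom] at h
  | cons w ws ih =>
    intro k y h
    by_cases hw : pvIsVB w <;> simp [pvPosFrom, hw] at h
    · rcases h with h | h
      · omega
      · have := ih (k + 1) y h; omega
    · have := ih (k + 1) y h; omega

theorem pvPosFrom_sorted (ws : List String) : ∀ k : Int, (pvPosFrom k ws).Pairwise (· ≤ ·) := by
  induction ws with
  | nil => intro k; simp [pvPosFrom]
  | cons w ws ih =>
    intro k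
    by_cases hw : pvIsVB w <;> simp [pvPosFrom, hw]
    · exact ⟨fun y hy => le_of_lt (lt_of_lt_of_le (by omega) (pvPosFrom_mem ws (k + 1) y hy)),
        ih (k + 1)⟩
    · exact ih (k + 1)

theorem pvPosFrom_countP (ws : List String) : ∀ (k x : Int),
    (pvPosFrom k ws).countP (fun p => decide (p < x)) = pvCntT ws (x - k).toNat := by
  induction ws with
  | nil => intro k x; simp [pvPosFrom, pvCntT]
  | cons w ws ih =>
    intro k x
    by_cases hx : x ≤ k
    · have h0 : (x - k).toNat = 0 := by omega
      rw [h0]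
      simp only [pvCntT, List.take_zero, List.countP_nil]
      rw [List.countP_eq_zero]
      intro y hy
      have := pvPosFrom_mem (w :: ws) k y hy
      simp; omega
    · have h1 : (x - k).toNat = (x - (k + 1)).toNat + 1 := by omega
      rw [h1]
      simp only [pvCntT, List.take_succ_cons, List.countP_cons]
      by_cases hw : pvIsVB w <;>
        simp [pvPosFrom, hw, List.countP_cons, ih (k + 1) x, pvCntT, show k < x by omega]

theorem pvBisectLeft_countP (xs : List Int) (x : Int) (hs : xs.Pairwise (· ≤ ·)) :
    PySem.List.bisectLeft xs x = xs.countP (fun p => decide (p < x)) := by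
  obtain ⟨hle, hlt, hge⟩ := PySem.List.bisectLeft_spec xs x hs
  set m := PySem.List.bisectLeft xs x with hm
  conv_rhs => rw [← List.take_append_drop m xs]
  rw [List.countP_append]
  have h1 : (xs.take m).countP (fun p => decide (p < x)) = m := by
    have hall : ∀ a ∈ xs.take m, (fun p => decide (p < x)) a = true := by
      intro a ha
      rcases List.mem_take_iff_getElem.1 ha with ⟨j, hj, rfl⟩
      simp only [decide_eq_true_eq]
      exact hlt j (by omega) (by omega)
    rw [List.countP_eq_length.2 hall, List.length_take]
    omega
  have h2 : (xs.drop m).countP (fun p => decide (p < x)) = 0 := by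
    rw [List.countP_eq_zero]
    intro a ha
    rcases List.mem_iff_getElem.1 ha with ⟨j, hj, rfl⟩
    have hj' : m + j < xs.length := by rw [List.length_drop] at hj; omega
    rw [List.getElem_drop]
    simp only [decide_eq_true_eq, not_lt]
    exact hge (m + j) hj' (by omega)
  omega

theorem pvBisectRight_countP (xs : List Int) (x : Int) (hs : xs.Pairwise (· ≤ ·)) :
    PySem.List.bisectRight xs x = xs.countP (fun p => decide (p ≤ x)) := by
  obtain ⟨hle, hlt, hge⟩ := PySem.List.bisectRight_spec xs x hs
  set m := PySem.List.bisectRight xs x with hm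
  conv_rhs => rw [← List.take_append_drop m xs]
  rw [List.countP_append]
  have h1 : (xs.take m).countP (fun p => decide (p ≤ x)) = m := by
    have hall : ∀ a ∈ xs.take m, (fun p => decide (p ≤ x)) a = true := by
      intro a ha
      rcases List.mem_take_iff_getElem.1 ha with ⟨j, hj, rfl⟩
      simp only [decide_eq_true_eq]
      exact hlt j (by omega) (by omega)
    rw [List.countP_eq_length.2 hall, List.length_take]
    omega
  have h2 : (xs.drop m).countP (fun p => decide (p ≤ x)) = 0 := by
    rw [List.countP_eq_zero]
    intro a ha
    rcases List.mem_iff_getElem.1 ha with ⟨j, hj, rfl⟩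
    have hj' : m + j < xs.length := by rw [List.length_drop] at hj; omega
    rw [List.getElem_drop]
    simp only [decide_eq_true_eq, not_le]
    exact hge (m + j) hj' (by omega)
  omega

-- B's per-query value in closed form (no bounds needed)
theorem pvAltVal (words : List String) (l r : Int) :
    ((PySem.List.bisectRight (pvPosFrom 0 words) r : Int) -
      (PySem.List.bisectLeft (pvPosFrom 0 words) l : Int))
      = (pvCntT words (r + 1).toNat : Int) - pvCntT words l.toNat := by
  have hs := pvPosFrom_sorted words 0
  have hR : PySem.List.bisectRight (pvPosFrom 0 words) r
      = (pvPosFrom 0 words).countP (fun p => decide (p < r + 1)) := by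
    rw [pvBisectRight_countP _ _ hs]
    refine List.countP_congr ?_
    intro a _
    simp only [decide_eq_true_eq]
    omega
  have hL := pvBisectLeft_countP (pvPosFrom 0 words) l hs
  rw [hR, hL, pvPosFrom_countP, pvPosFrom_countP]
  norm_num

-- A's first loop: the fold fills the prefix array with running counts
theorem pvFoldA (ws : List String) : ∀ (pre : List Int) (c : Int) (rest : Nat),
    pre ≠ [] → pre.getLast? = some c →
    (PySem.List.enumerate ws ((pre.length : Int) - 1)).foldl pvStepA
        (pre ++ List.replicate (ws.length + rest) 0)
      = pre ++ pvSumsFrom c ws ++ List.replicate rest 0 := by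
  induction ws with
  | nil => intro pre c rest _ _; simp [PySem.List.enumerate_nil, pvSumsFrom]
  | cons w ws ih =>
    intro pre c rest hne hlast
    have hlen : 1 ≤ pre.length := List.length_pos_iff.2 hne
    rw [PySem.List.enumerate_cons, List.foldl_cons]
    have hrep : List.replicate ((w :: ws).length + rest) (0 : Int)
        = 0 :: List.replicate (ws.length + rest) 0 := by
      rw [show (w :: ws).length + rest = (ws.length + rest) + 1 by simp; omega,
        List.replicate_succ]
    have hgetc : PySem.List.pyGetD (pre ++ 0 :: List.replicate (ws.length + rest) (0 : Int))
        ((pre.length : Int) - 1) 0 = c := by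
      have hcast : ((pre.length : Int) - 1) = ((pre.length - 1 : Nat) : Int) := by omega
      rw [hcast, PySem.List.pyGetD_natCast]
      rw [List.getD_append _ _ _ _ (by omega)]
      rw [List.getLast?_eq_getElem?] at hlast
      simp only [List.getD, hlast]; rfl
    set c' := if pvIsVB w then c + 1 else c with hc'
    have hstep : pvStepA (pre ++ 0 :: List.replicate (ws.length + rest) (0 : Int))
        ((pre.length : Int) - 1, w)
        = (pre ++ [c']) ++ List.replicate (ws.length + rest) 0 := by
      have hidx : ((pre.length : Int) - 1 + 1) = ((pre.length : Nat) : Int) := by omega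
      have hset : ∀ v : Int, (pre ++ 0 :: List.replicate (ws.length + rest) (0 : Int)).set pre.length v
          = (pre ++ [v]) ++ List.replicate (ws.length + rest) 0 := by
        intro v
        rw [List.set_append_right _ _ (le_refl _)]
        simp
      simp only [pvStepA]
      by_cases hw : pvIsVB w
      · have hc : c' = c + 1 := by simp [hc', hw]
        rw [if_pos hw, hgetc, hidx, PySem.List.pySetD_natCast, hset]
        try rw [hc]
      · have hc : c' = c := by simp [hc', hw]
        rw [if_neg hw, hgetc, hidx, PySem.List.pySetD_natCast, hset]
        try rw [hc]
    rw [hrep, hstep]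
    have harg : ((pre.length : Int) - 1 + 1) = (((pre ++ [c']).length : Int) - 1) := by
      simp
    rw [harg, ih (pre ++ [c']) c' rest (by simp) List.getLast?_concat]
    by_cases hw : pvIsVB w <;> simp [pvSumsFrom, hc', hw]

theorem pvSums_getElem? (ws : List String) : ∀ (c : Int) (k : Nat), k ≤ ws.length →
    (c :: pvSumsFrom c ws)[k]? = some (c + (pvCntT ws k : Int)) := by
  induction ws with
  | nil =>
    intro c k hk
    have hk0 : k = 0 := by simpa using hk
    subst hk0
    simp [pvCntT]
  | cons w ws ih =>
    intro c k hk
    cases k with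
    | zero => simp [pvCntT]
    | succ k =>
      have : (c :: pvSumsFrom c (w :: ws))[k + 1]?
          = ((if pvIsVB w then c + 1 else c) :: pvSumsFrom (if pvIsVB w then c + 1 else c) ws)[k]? := by
        simp [pvSumsFrom]
      rw [this, ih _ k (by simpa using hk)]
      by_cases hw : pvIsVB w <;>
        simp [pvCntT, List.take_succ_cons, List.countP_cons, hw] <;> push_cast <;> ring

theorem pvSums_length (ws : List String) : ∀ c : Int, (pvSumsFrom c ws).length = ws.length := by
  induction ws with
  | nil => intro c; simp [pvSumsFrom]
  | cons w ws ih => intro c; simp [pvSumsFrom, ih]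

-- the prefix array read with Python's (possibly wrapping) index
theorem pvPrevGet (words : List String) (t : Int)
    (h1 : -((words.length : Int) + 1) ≤ t) (h2 : t ≤ (words.length : Int)) :
    PySem.List.pyGet? (0 :: pvSumsFrom 0 words) t
      = some ((pvCntT words (pvAIdx words.length t) : Int)) := by
  have hlen : (0 :: pvSumsFrom 0 words).length = words.length + 1 := by
    simp [pvSums_length]
  by_cases ht : 0 ≤ t
  · rw [PySem.List.pyGet?_of_nonneg _ ht]
    have := pvSums_getElem? words 0 t.toNat (by omega)
    rw [this]
    simp [pvAIdx, ht]
  · have hidx : PySem.List.pyGet? (0 :: pvSumsFrom 0 words) t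
        = (0 :: pvSumsFrom 0 words)[(words.length + 1) - (-t).toNat]? := by
      simp only [PySem.List.pyGet?, PySem.List.pyIdx?, hlen]
      rw [if_neg ht, if_pos (by push_cast; omega)]
      rfl
    rw [hidx]
    have hk : (words.length + 1) - (-t).toNat = ((words.length : Int) + 1 + t).toNat := by omega
    rw [hk, pvSums_getElem? words 0 _ (by omega)]
    simp only [pvAIdx, if_neg ht]
    norm_num

-- A's second loop: filling res by index is a map over the queries
theorem pvFoldRes (g : List Int → Int) (qs : List (List Int)) : ∀ (pre : List Int) (rest : Nat),
    (PySem.List.enumerate qs (pre.length : Int)).foldl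
        (fun res p => PySem.List.pySetD res p.1 (g p.2))
        (pre ++ List.replicate (qs.length + rest) 0)
      = pre ++ qs.map g ++ List.replicate rest 0 := by
  induction qs with
  | nil => intro pre rest; simp [PySem.List.enumerate_nil]
  | cons q qs ih =>
    intro pre rest
    rw [PySem.List.enumerate_cons, List.foldl_cons]
    have hrep : List.replicate ((q :: qs).length + rest) (0 : Int)
        = 0 :: List.replicate (qs.length + rest) 0 := by
      rw [show (q :: qs).length + rest = (qs.length + rest) + 1 by simp; omega,
        List.replicate_succ]
    have hstep : PySem.List.pySetD (pre ++ 0 :: List.replicate (qs.length + rest) (0 : Int))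
        ((pre.length : Nat) : Int) (g q) = (pre ++ [g q]) ++ List.replicate (qs.length + rest) 0 := by
      rw [PySem.List.pySetD_natCast, List.set_append_right _ _ (le_refl _)]
      simp
    have harg : ((pre.length : Int) + 1) = (((pre ++ [g q]).length : Nat) : Int) := by
      simp
    rw [hrep, hstep, harg, ih (pre ++ [g q]) rest]
    simp

-- A's result as a map over the queries
theorem pvA_eq_map (words : List String) (queries : List (List Int)) :
    vowelStrings words queries
      = queries.map (fun q =>
          (PySem.List.pyGet? (0 :: pvSumsFrom 0 words) (PySem.List.pyGetD q 1 0 + 1)).getD 0 -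
          (PySem.List.pyGet? (0 :: pvSumsFrom 0 words) (PySem.List.pyGetD q 0 0)).getD 0) := by
  unfold vowelStrings
  have hprev : (PySem.List.enumerate words).foldl pvStepA
      (List.replicate (words.length + 1) 0) = 0 :: pvSumsFrom 0 words := by
    have h0 : PySem.List.enumerate words (0 : Int) = PySem.List.enumerate words ((([0] : List Int).length : Int) - 1) := by
      norm_num
    have h1 : List.replicate (words.length + 1) (0 : Int)
        = [0] ++ List.replicate (words.length + 0) 0 := by
      simp [List.replicate_succ]
    rw [h0, h1, pvFoldA words [0] 0 0 (by simp) (by simp)]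
    simp
  rw [hprev]
  have := pvFoldRes (fun q =>
      (PySem.List.pyGet? (0 :: pvSumsFrom 0 words) (PySem.List.pyGetD q 1 0 + 1)).getD 0 -
      (PySem.List.pyGet? (0 :: pvSumsFrom 0 words) (PySem.List.pyGetD q 0 0)).getD 0)
    queries [] 0
  simpa using this

-- B's result as a map over the queries
theorem pvB_eq_map (words : List String) (queries : List (List Int)) :
    vowelStrings_alt words queries
      = queries.map (fun q =>
          (pvCntT words (PySem.List.pyGetD q 1 0 + 1).toNat : Int) -
          pvCntT words (PySem.List.pyGetD q 0 0).toNat) := by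
  unfold vowelStrings_alt
  rw [pvPosFrom_eq words 0]
  exact List.map_congr_left (fun q _ => pvAltVal words _ _)

-- per-query: under pvQOk, A's per-query value is the wrapped prefix-count difference
theorem pvPerQuery (words : List String) (l r : Int)
    (h1 : -((words.length : Int) + 1) ≤ l) (h2 : l ≤ (words.length : Int))
    (h3 : -((words.length : Int) + 2) ≤ r) (h4 : r ≤ (words.length : Int) - 1) :
    (PySem.List.pyGet? (0 :: pvSumsFrom 0 words) (r + 1)).getD 0 -
      (PySem.List.pyGet? (0 :: pvSumsFrom 0 words) l).getD 0
      = (pvCntT words (pvAIdx words.length (r + 1)) : Int)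
        - pvCntT words (pvAIdx words.length l) := by
  rw [pvPrevGet words (r + 1) (by omega) (by omega), pvPrevGet words l (by omega) (by omega)]
  simp

-- ===== VERDICT (by name: the statement is the Claim_ definition above) =====
theorem vowelStrings_spec : Claim_unchanged_vowelStrings := by
  intro words queries _ hpre hnd
  rw [pvA_eq_map, pvB_eq_map]
  apply List.map_congr_left
  intro q hq
  have hok : pvQOk (words.length : Int) q = true := (List.all_eq_true.1 hpre.2) q hq
  have hqb : pvQBad words q = false := by
    by_contra h
    exact hnd ((pvD_iff words queries).2 (List.any_eq_true.2 ⟨q, hq, by simpa using h⟩))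
  match q with
  | [l, r] =>
    simp only [pvQOk, decide_eq_true_eq] at hok
    obtain ⟨h1, h2, h3, h4⟩ := hok
    have hdq : pvG words (r + 1) = pvG words l := by
      by_contra h
      have hb := (pvQBad_iff words l r).2 h
      rw [hqb] at hb
      simp at hb
    have hl : PySem.List.pyGetD [l, r] 0 0 = l := rfl
    have hr : PySem.List.pyGetD [l, r] 1 0 = r := rfl
    simp only [hl, hr]
    rw [pvPerQuery words l r h1 h2 h3 h4, pvCnt_wrap words (r + 1) (by omega),
      pvCnt_wrap words l (by omega)]
    omega
  | [] => simp [pvQOk] at hok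
  | [_] => simp [pvQOk] at hok
  | _ :: _ :: _ :: _ :: _ => simp [pvQOk] at hok

theorem vowelStrings_changed : Claim_changed_vowelStrings := by
  unfold Claim_changed_vowelStrings; decide

theorem vowelStrings_tight : Claim_exact_vowelStrings := by
  intro words queries _ hpre hd heq
  rw [pvA_eq_map, pvB_eq_map, List.map_inj_left] at heq
  rw [pvD_iff, List.any_eq_true] at hd
  obtain ⟨q, hq, hqb⟩ := hd
  have hok : pvQOk (words.length : Int) q = true := (List.all_eq_true.1 hpre.2) q hq
  have hval := heq q hq
  match q with
  | [l, r] =>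
    simp only [pvQOk, decide_eq_true_eq] at hok
    obtain ⟨h1, h2, h3, h4⟩ := hok
    have hdq : pvG words (r + 1) ≠ pvG words l := (pvQBad_iff words l r).1 hqb
    have hl : PySem.List.pyGetD [l, r] 0 0 = l := rfl
    have hr : PySem.List.pyGetD [l, r] 1 0 = r := rfl
    simp only [hl, hr] at hval
    rw [pvPerQuery words l r h1 h2 h3 h4, pvCnt_wrap words (r + 1) (by omega),
      pvCnt_wrap words l (by omega)] at hval
    omega
  | [] => simp [pvQOk] at hok
  | [_] => simp [pvQOk] at hok
  | _ :: _ :: _ :: _ :: _ => simp [pvQOk] at hok
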